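-- pv_equiv track=rewrite | github.com/daniel-sinai/moogle | moogle.py | filter_max_dict
-- ===== SOURCE A (Python) =====
-- def sort_list_by_values(sorted_dict):
--     """
--     This function sorts a list according to a dictionary values
--     :param sorted_dict: Sorted dictionary
--     :return: Sorted list according to the dictionary values
--     """
--     sorted_list = []
--     for key in sorted_dict:
--         sorted_list.append(key)
--     return sorted_list
--
-- def filter_max_dict(query_list, sorted_rank_dict, word_dict, max_results):
--     """
--     This function filters the ranking dictionary to max_results pages
--     :param query_list: List of query word/s
--     :param sorted_rank_dict: Sorted ranking dictionary
--     :param word_dict: Words dictionary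
--     :param max_results: Num of pages to be on the final dictionary
--     :return: Filtered dictionary with max_results pages
--     """
--     sorted_relatives_list = sort_list_by_values(sorted_rank_dict)
--     max_results_dict = dict()
--     for relative in sorted_relatives_list:
--         if relative in sorted_rank_dict:
--             flag = True
--             for q in query_list:
--                 if q not in word_dict:
--                     continue
--                 else:
--                     if relative not in word_dict[q]:
--                         flag = False
--                         break
--             if flag and len(max_results_dict) < max_results:
--                 max_results_dict[relative] = sorted_rank_dict[relative]
--     return max_results_dict
-- ===== SOURCE B (Python) =====
-- def filter_max_dict(query_list, sorted_rank_dict, word_dict, max_results):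
--     """
--     Filter the ranking dictionary to the first max_results qualifying pages.
--     Precomputes the intersection of the query words' page sets once, then makes
--     a single counted pass over the ranked pages (no per-page scan of the query words).
--     """
--     hits = None
--     for q in query_list:
--         if q in word_dict:
--             s = set(word_dict[q])
--             hits = s if hits is None else hits & s
--     result = {}
--     count = 0
--     for page in sorted_rank_dict:
--         if count < max_results and (hits is None or page in hits):
--             result[page] = sorted_rank_dict[page]
--             count += 1
--     return result
-- ===== Notes on version B (the rewrite author's own statement) =====
-- stated objective: alternative
-- what changed: Instead of re-scanning word_dict's query-word lists for each page, B intersects the query words' page sets once up front and then makes a single counted pass over the ranked pages, adding a page while the counter is below max_results and the page is in the intersection (measured no faster on the generated inputs, so claimed only as a different algorithm).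
import Mathlib
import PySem

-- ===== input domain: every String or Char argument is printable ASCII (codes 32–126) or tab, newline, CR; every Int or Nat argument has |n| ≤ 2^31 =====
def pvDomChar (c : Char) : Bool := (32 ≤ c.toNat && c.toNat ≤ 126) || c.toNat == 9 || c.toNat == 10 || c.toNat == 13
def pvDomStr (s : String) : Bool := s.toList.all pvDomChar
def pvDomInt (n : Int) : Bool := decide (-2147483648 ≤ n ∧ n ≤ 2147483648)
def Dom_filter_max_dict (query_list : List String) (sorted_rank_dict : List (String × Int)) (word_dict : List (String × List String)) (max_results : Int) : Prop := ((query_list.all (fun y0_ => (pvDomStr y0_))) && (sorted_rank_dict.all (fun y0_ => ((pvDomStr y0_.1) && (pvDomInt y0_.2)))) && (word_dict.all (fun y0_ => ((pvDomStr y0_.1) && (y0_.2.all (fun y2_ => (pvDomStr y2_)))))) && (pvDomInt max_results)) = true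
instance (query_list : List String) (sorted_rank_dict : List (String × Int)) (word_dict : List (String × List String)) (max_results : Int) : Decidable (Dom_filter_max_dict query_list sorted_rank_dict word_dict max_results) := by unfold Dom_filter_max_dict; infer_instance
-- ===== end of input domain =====

-- ===== PORT A =====
-- B precomputes the query words' page-set intersection once and makes a single counted pass
-- with a counter, instead of A's per-page scan over the query words (objective: alternative).
def sort_list_by_values (sorted_dict : List (String × Int)) : List String :=
  sorted_dict.foldl (fun sorted_list kv => sorted_list ++ [kv.1]) []

-- the inner 'for q in query_list' loop of A, with its break
def pvFlagLoop (query_list : List String) (word_dict : List (String × List String)) (relative : String) : Bool :=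
  match query_list with
  | [] => true
  | q :: rest =>
    match (PySem.Dict.mk word_dict).get? q with
    | none => pvFlagLoop rest word_dict relative          -- q not in word_dict: continue
    | some ws =>
      if ws.contains relative then pvFlagLoop rest word_dict relative
      else false                                          -- flag = False; break

def filter_max_dict (query_list : List String) (sorted_rank_dict : List (String × Int)) (word_dict : List (String × List String)) (max_results : Int) : List (String × Int) :=
  let sorted_relatives_list := sort_list_by_values sorted_rank_dict
  let max_results_dict :=
    sorted_relatives_list.foldl (fun (acc : PySem.Dict String Int) relative =>
      if (PySem.Dict.mk sorted_rank_dict).contains relative then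
        let flag := pvFlagLoop query_list word_dict relative
        if flag && decide ((acc.size : Int) < max_results) then
          match (PySem.Dict.mk sorted_rank_dict).get? relative with
          | some v => acc.insert relative v
          | none => acc          -- unreachable: relative is a key of sorted_rank_dict
        else acc
      else acc) PySem.Dict.empty
  max_results_dict.items

-- ===== PORT B =====
def filter_max_dict_alt (query_list : List String) (sorted_rank_dict : List (String × Int)) (word_dict : List (String × List String)) (max_results : Int) : List (String × Int) :=
  let hits : Option (PySem.Set String) :=
    query_list.foldl (fun h q =>
      match (PySem.Dict.mk word_dict).get? q with
      | none => h
      | some ws =>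
        let s := PySem.Set.ofList ws
        match h with
        | none => some s
        | some h0 => some (PySem.Set.inter h0 s)) none
  let st :=
    sorted_rank_dict.foldl (fun (st : PySem.Dict String Int × Int) kv =>
      let page := kv.1
      if decide (st.2 < max_results) &&
          (match hits with | none => true | some h => PySem.Set.contains h page) then
        match (PySem.Dict.mk sorted_rank_dict).get? page with
        | some v => (st.1.insert page v, st.2 + 1)
        | none => st
      else st) (PySem.Dict.empty, (0 : Int))
  st.1.items

-- ===== PRECONDITION & SPEC =====
-- Pre_ excludes association lists whose keys repeat: sorted_rank_dict encodes a Python dict,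
-- which cannot have duplicate keys, so such lists represent no Python input.
def Pre_filter_max_dict (query_list : List String) (sorted_rank_dict : List (String × Int)) (word_dict : List (String × List String)) (max_results : Int) : Prop :=
  (sorted_rank_dict.map Prod.fst).Nodup
instance (query_list : List String) (sorted_rank_dict : List (String × Int)) (word_dict : List (String × List String)) (max_results : Int) : Decidable (Pre_filter_max_dict query_list sorted_rank_dict word_dict max_results) := by unfold Pre_filter_max_dict; infer_instance

def pvWitness_filter_max_dict : List String × (List (String × Int)) × (List (String × List String)) × Int :=
  (["a"], [("p", 3), ("q", 2)], [("a", ["p", "q"])], 1)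

def Spec_filter_max_dict (query_list : List String) (sorted_rank_dict : List (String × Int)) (word_dict : List (String × List String)) (max_results : Int) (out : List (String × Int)) : Prop := out = filter_max_dict_alt query_list sorted_rank_dict word_dict max_results
instance (query_list : List String) (sorted_rank_dict : List (String × Int)) (word_dict : List (String × List String)) (max_results : Int) (out : List (String × Int)) : Decidable (Spec_filter_max_dict query_list sorted_rank_dict word_dict max_results out) := by unfold Spec_filter_max_dict; infer_instance

-- ===== CLAIM (what is proved, stated in full; the proofs are below) =====
def Claim_equal_filter_max_dict : Prop := ∀ (query_list : List String) (sorted_rank_dict : List (String × Int)) (word_dict : List (String × List String)) (max_results : Int), Dom_filter_max_dict query_list sorted_rank_dict word_dict max_results → Pre_filter_max_dict query_list sorted_rank_dict word_dict max_results → Spec_filter_max_dict query_list sorted_rank_dict word_dict max_results (filter_max_dict query_list sorted_rank_dict word_dict max_results)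

-- ===== LEMMAS AND PROOFS =====

-- membership test B applies to the current hits accumulator
def pvHitsMem (h : Option (PySem.Set String)) (page : String) : Bool :=
  match h with | none => true | some s => PySem.Set.contains s page

-- B's hits accumulator, as a function of the remaining query words
def pvHitsFold (query_list : List String) (word_dict : List (String × List String)) (h : Option (PySem.Set String)) : Option (PySem.Set String) :=
  query_list.foldl (fun h q =>
    match (PySem.Dict.mk word_dict).get? q with
    | none => h
    | some ws =>
      let s := PySem.Set.ofList ws
      match h with
      | none => some s
      | some h0 => some (PySem.Set.inter h0 s)) h

-- one update of the hits accumulator by a present query word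
theorem pvHitsMem_step (ws : List String) (h : Option (PySem.Set String)) (page : String) :
    pvHitsMem (match h with
      | none => some (PySem.Set.ofList ws)
      | some h0 => some (PySem.Set.inter h0 (PySem.Set.ofList ws))) page
      = (pvHitsMem h page && ws.contains page) := by
  cases h with
  | none => simp [pvHitsMem]
  | some h0 =>
    simp only [pvHitsMem]
    rw [Bool.eq_iff_iff, Bool.and_eq_true, PySem.Set.contains_iff, PySem.Set.contains_iff,
      PySem.Set.mem_inter, PySem.Set.mem_ofList, List.contains_iff_mem]

theorem pvHitsMem_fold (query_list : List String) (word_dict : List (String × List String))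
    (page : String) (h : Option (PySem.Set String)) :
    pvHitsMem (pvHitsFold query_list word_dict h) page
      = (pvHitsMem h page && pvFlagLoop query_list word_dict page) := by
  induction query_list generalizing h with
  | nil => simp [pvHitsFold, pvFlagLoop]
  | cons q rest ih =>
    simp only [pvHitsFold, List.foldl_cons]
    cases hq : (PySem.Dict.mk word_dict).get? q with
    | none =>
      rw [show pvFlagLoop (q :: rest) word_dict page = pvFlagLoop rest word_dict page from by
        simp [pvFlagLoop, hq]]
      have := ih h
      simp only [pvHitsFold] at this
      simpa [hq] using this
    | some ws =>
      have key := ih (match h with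
        | none => some (PySem.Set.ofList ws)
        | some h0 => some (PySem.Set.inter h0 (PySem.Set.ofList ws)))
      simp only [pvHitsFold] at key
      refine key.trans ?_
      rw [pvHitsMem_step]
      by_cases hmem : ws.contains page <;>
        simp [pvFlagLoop, hq, Bool.and_assoc]

-- A's main loop (over a key list) and B's main loop (over a pair list), abstracted
def pvALoop (query_list : List String) (sorted_rank_dict : List (String × Int)) (word_dict : List (String × List String)) (max_results : Int) (ks : List String) (acc : PySem.Dict String Int) : PySem.Dict String Int :=
  ks.foldl (fun (acc : PySem.Dict String Int) relative =>
    if (PySem.Dict.mk sorted_rank_dict).contains relative then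
      if pvFlagLoop query_list word_dict relative && decide ((acc.size : Int) < max_results) then
        match (PySem.Dict.mk sorted_rank_dict).get? relative with
        | some v => acc.insert relative v
        | none => acc
      else acc
    else acc) acc

def pvBLoop (hits : Option (PySem.Set String)) (sorted_rank_dict : List (String × Int)) (max_results : Int) (l : List (String × Int)) (st : PySem.Dict String Int × Int) : PySem.Dict String Int × Int :=
  l.foldl (fun (st : PySem.Dict String Int × Int) kv =>
    if decide (st.2 < max_results) && pvHitsMem hits kv.1 then
      match (PySem.Dict.mk sorted_rank_dict).get? kv.1 with
      | some v => (st.1.insert kv.1 v, st.2 + 1)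
      | none => st
    else st) st

theorem pvLoop_eq (query_list : List String) (sorted_rank_dict : List (String × Int)) (word_dict : List (String × List String)) (max_results : Int)
    (l : List (String × Int)) (acc : PySem.Dict String Int) (cnt : Int)
    (hsub : ∀ p ∈ l, (PySem.Dict.mk sorted_rank_dict).contains p.1 = true)
    (hnd : (l.map Prod.fst).Nodup)
    (hfresh : ∀ p ∈ l, acc.contains p.1 = false)
    (hcnt : cnt = (acc.size : Int)) :
    pvALoop query_list sorted_rank_dict word_dict max_results (l.map Prod.fst) acc
      = (pvBLoop (pvHitsFold query_list word_dict none) sorted_rank_dict max_results l (acc, cnt)).1 := by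
  induction l generalizing acc cnt with
  | nil => simp [pvALoop, pvBLoop]
  | cons p rest ih =>
    simp only [List.map_cons, pvALoop, pvBLoop, List.foldl_cons]
    have hc : (PySem.Dict.mk sorted_rank_dict).contains p.1 = true := hsub p List.mem_cons_self
    rw [hc]
    have hflag : pvHitsMem (pvHitsFold query_list word_dict none) p.1
        = pvFlagLoop query_list word_dict p.1 := by
      rw [pvHitsMem_fold]; simp [pvHitsMem]
    have hndr : (rest.map Prod.fst).Nodup := (List.nodup_cons.mp hnd).2
    have hhead : p.1 ∉ rest.map Prod.fst := (List.nodup_cons.mp hnd).1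
    simp only [if_true]
    rw [hflag, ← hcnt]
    cases hfl : pvFlagLoop query_list word_dict p.1 with
    | false =>
      simp only [Bool.and_false, Bool.false_and, Bool.false_eq_true, if_false]
      exact ih acc cnt (fun q hq => hsub q (List.mem_cons_of_mem _ hq)) hndr
        (fun q hq => hfresh q (List.mem_cons_of_mem _ hq)) hcnt
    | true =>
      by_cases hlt : cnt < max_results
      · simp only [hlt, decide_true, Bool.and_true, if_true]
        cases hget : (PySem.Dict.mk sorted_rank_dict).get? p.1 with
        | none =>
          exfalso
          rw [PySem.Dict.contains_eq_isSome_get?, hget] at hc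
          simp at hc
        | some v =>
          exact ih (acc.insert p.1 v) (cnt + 1)
            (fun q hq => hsub q (List.mem_cons_of_mem _ hq)) hndr
            (fun q hq => by
              rw [PySem.Dict.contains_insert]
              have h1 : acc.contains q.1 = false := hfresh q (List.mem_cons_of_mem _ hq)
              have h2 : q.1 ≠ p.1 := by
                intro he
                exact hhead (he ▸ List.mem_map_of_mem hq)
              simp [h1, h2])
            (by
              rw [PySem.Dict.size_insert, hfresh p List.mem_cons_self]
              push_cast; omega)
      · simp only [hlt, decide_false, Bool.false_and, Bool.and_false, Bool.false_eq_true, if_false]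
        exact ih acc cnt (fun q hq => hsub q (List.mem_cons_of_mem _ hq)) hndr
          (fun q hq => hfresh q (List.mem_cons_of_mem _ hq)) hcnt

theorem sort_list_by_values_eq (sorted_dict : List (String × Int)) :
    sort_list_by_values sorted_dict = sorted_dict.map Prod.fst := by
  simpa [sort_list_by_values] using
    PySem.List.foldl_append_singleton_eq_map Prod.fst sorted_dict []

-- ===== VERDICT (by name: the statement is the Claim_ definition above) =====
theorem filter_max_dict_spec : Claim_equal_filter_max_dict := by
  intro query_list sorted_rank_dict word_dict max_results _ hpre
  unfold Spec_filter_max_dict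
  have hmain := pvLoop_eq query_list sorted_rank_dict word_dict max_results
    sorted_rank_dict PySem.Dict.empty 0
    (fun p hp => by
      rw [PySem.Dict.contains_eq_isSome_get?]
      cases hg : (PySem.Dict.mk sorted_rank_dict).get? p.1 with
      | none =>
        exfalso
        rw [PySem.Dict.get?_eq_none_iff_not_mem_keys] at hg
        apply hg
        simp only [PySem.Dict.keys]
        exact List.mem_map_of_mem hp
      | some v => rfl)
    hpre
    (fun p _ => by simp [PySem.Dict.contains_empty])
    (by simp [PySem.Dict.size_empty])
  rw [← sort_list_by_values_eq] at hmain
  exact congrArg (fun d : PySem.Dict String Int => d.items) hmain
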